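-- pv_equiv track=rewrite | github.com/NakulUpadhyay1/Hack-Stuff | Advent_Of_Code/2015/day8/script2.py | encode_string_length_difference
-- ===== SOURCE A (Python) =====
-- def encode_string_length_difference(input_strings):
--     total_difference = 0
--
--     for string_literal in input_strings:
--         original_length = len(string_literal)
--         encoded_length = len(encode_string(string_literal))
--         difference = encoded_length - original_length
--         total_difference += difference
--
--     return total_difference
--
-- def encode_string(s):
--     s = s.replace('\\', '\\\\')
--     s = s.replace('"', '\\"')
--     s = '"' + s + '"'
--     return s
-- ===== SOURCE B (Python) =====
-- def encode_string_length_difference(input_strings):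
--     # Each encoding adds the two surrounding quotes plus one escape
--     # backslash per '\' or '"' in the string; no string is built.
--     return sum(2 + s.count('\\') + s.count('"') for s in input_strings)
-- ===== Notes on version B (the rewrite author's own statement) =====
-- stated objective: simpler
-- what changed: Replaces building each encoded string via two replace passes plus concatenation with a direct arithmetic count: per string the delta is 2 + count('\\') + count('"'), summed in one comprehension.
import Mathlib
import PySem

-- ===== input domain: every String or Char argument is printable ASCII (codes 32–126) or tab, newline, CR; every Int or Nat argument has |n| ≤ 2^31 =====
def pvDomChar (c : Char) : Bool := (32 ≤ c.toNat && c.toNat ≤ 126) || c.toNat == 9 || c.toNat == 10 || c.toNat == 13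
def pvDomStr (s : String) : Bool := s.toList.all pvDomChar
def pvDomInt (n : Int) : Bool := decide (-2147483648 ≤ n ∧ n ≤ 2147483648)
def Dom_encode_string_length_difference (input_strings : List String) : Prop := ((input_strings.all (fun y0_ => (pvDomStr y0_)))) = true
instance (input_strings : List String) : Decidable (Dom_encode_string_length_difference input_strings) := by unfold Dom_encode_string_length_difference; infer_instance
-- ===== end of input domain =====

-- B computes each string's encoded-minus-original delta arithmetically (2 + # of '\' and '"')
-- instead of building the escaped string; objective: simpler.


-- ===== PORT A =====
def encode_string (s : String) : String :=
  let s1 := PySem.Str.replace s "\\" "\\\\"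
  let s2 := PySem.Str.replace s1 "\"" "\\\""
  -- '"' + s + '"' : string concatenation, exact (ported as list-level cons/append of the code points)
  String.ofList ('"' :: s2.toList ++ ['"'])

def encode_string_length_difference (input_strings : List String) : Int :=
  input_strings.foldl (fun total_difference string_literal =>
    let original_length := PySem.Str.len string_literal
    let encoded_length := PySem.Str.len (encode_string string_literal)
    let difference := encoded_length - original_length
    total_difference + difference) 0

-- ===== PORT B =====
def encode_string_length_difference_alt (input_strings : List String) : Int :=
  (input_strings.map (fun s =>
    2 + (PySem.Str.count s "\\" : Int) + (PySem.Str.count s "\"" : Int))).sum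

-- ===== PRECONDITION & SPEC =====
def Spec_encode_string_length_difference (input_strings : List String) (out : Int) : Prop := out = encode_string_length_difference_alt input_strings
instance (input_strings : List String) (out : Int) : Decidable (Spec_encode_string_length_difference input_strings out) := by unfold Spec_encode_string_length_difference; infer_instance

-- ===== CLAIM (what is proved, stated in full; the proofs are below) =====
def Claim_equal_encode_string_length_difference : Prop := ∀ (input_strings : List String), Dom_encode_string_length_difference input_strings → Spec_encode_string_length_difference input_strings (encode_string_length_difference input_strings)

-- ===== LEMMAS AND PROOFS =====

-- single-character replace is a per-character flatMap
theorem replace_go_single (c : Char) (new : List Char) :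
    ∀ (l : List Char) (fuel : Nat) (acc : List Char), l.length ≤ fuel →
    PySem.Chars.replace.go [c] new fuel l acc
      = acc.reverse ++ l.flatMap (fun x => if x = c then new else [x]) := by
  intro l
  induction l with
  | nil =>
    intro fuel acc _
    cases fuel <;> simp [PySem.Chars.replace.go]
  | cons x t ih =>
    intro fuel acc h
    cases fuel with
    | zero => simp at h
    | succ fuel =>
      by_cases hx : x = c
      · subst hx
        simp only [PySem.Chars.replace.go, List.isPrefixOf, ]
        simp [ih fuel _ (by simpa using h)]
      · simp only [PySem.Chars.replace.go, List.isPrefixOf]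
        simp [hx, ih fuel _ (by simpa using h), Ne.symm hx]

theorem replace_single (cs : List Char) (c : Char) (new : List Char) :
    PySem.Chars.replace cs [c] new = cs.flatMap (fun x => if x = c then new else [x]) := by
  simp [PySem.Chars.replace, replace_go_single c new cs cs.length [] le_rfl]

-- single-character count is countP
theorem count_go_single (c : Char) :
    ∀ (l : List Char) (fuel : Nat) (acc : Nat), l.length ≤ fuel →
    PySem.Chars.count.go [c] fuel l acc = acc + l.countP (· = c) := by
  intro l
  induction l with
  | nil =>
    intro fuel acc _
    cases fuel <;> simp [PySem.Chars.count.go]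
  | cons x t ih =>
    intro fuel acc h
    cases fuel with
    | zero => simp at h
    | succ fuel =>
      by_cases hx : x = c
      · subst hx
        simp only [PySem.Chars.count.go, List.isPrefixOf]
        simp [ih fuel _ (by simpa using h)]
        omega
      · simp only [PySem.Chars.count.go, List.isPrefixOf]
        simp [hx, Ne.symm hx, ih fuel _ (by simpa using h)]

theorem count_single (cs : List Char) (c : Char) :
    PySem.Chars.count cs [c] = cs.countP (· = c) := by
  simp [PySem.Chars.count, count_go_single c cs cs.length 0 le_rfl]

-- length of the two escape passes = length + #backslashes + #quotes
theorem double_flatMap_len (cs : List Char) :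
    ((cs.flatMap (fun x => if x = '\\' then ['\\', '\\'] else [x])).flatMap
      (fun x => if x = '"' then ['\\', '"'] else [x])).length
    = cs.length + cs.countP (· = '\\') + cs.countP (· = '"') := by
  induction cs with
  | nil => simp
  | cons x t ih =>
    by_cases h1 : x = '\\'
    · subst h1; simp [ih]; omega
    · by_cases h2 : x = '"'
      · subst h2; simp [ih]; omega
      · simp [h1, h2, ih]; omega

-- per-string delta
theorem delta_eq (s : String) :
    PySem.Str.len (encode_string s) - PySem.Str.len s
      = 2 + (PySem.Str.count s "\\" : Int) + (PySem.Str.count s "\"" : Int) := by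
  simp only [encode_string, PySem.Str.len_eq, PySem.Str.count_eq, PySem.Str.toList_replace]
  have h1 : ("\\" : String).toList = ['\\'] := by decide
  have h2 : ("\\\\" : String).toList = ['\\', '\\'] := by decide
  have h3 : ("\"" : String).toList = ['"'] := by decide
  have h4 : ("\\\"" : String).toList = ['\\', '"'] := by decide
  rw [h1, h2, h3, h4, replace_single, replace_single, count_single, count_single]
  simp only [String.toList_ofList, List.length_append, List.length_cons, List.length_nil,
    double_flatMap_len]
  push_cast
  ring

-- ===== VERDICT (by name: the statement is the Claim_ definition above) =====
theorem encode_string_length_difference_spec : Claim_equal_encode_string_length_difference := by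
  intro input_strings _
  unfold Spec_encode_string_length_difference encode_string_length_difference
    encode_string_length_difference_alt
  simp only []
  rw [PySem.List.foldl_add input_strings
    (fun s => PySem.Str.len (encode_string s) - PySem.Str.len s) 0]
  simp only [delta_eq, zero_add]
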